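-- pv_equiv track=rewrite | github.com/jamesben6688/coding | swipe_line/矩形面积_像素归属法.py | compute_visible_area_by_pixel
-- ===== SOURCE A (Python) =====
-- from collections import defaultdict
--
-- def compute_visible_area_by_pixel(screen_size, windows):
--     W, H = screen_size
--     screen = [[None for _ in range(W)] for _ in range(H)]
--
--     # 按 z-order 升序处理（低的先画，越高的越后盖住）
--     sorted_windows = sorted(windows.items(), key=lambda x: x[1][2])
--
--     for name, ((x1, y1), (x2, y2), z) in sorted_windows:
--         # 限制在屏幕内（防止越界）
--         x1 = max(0, min(x1, W))
--         x2 = max(0, min(x2, W))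
--         y1 = max(0, min(y1, H))
--         y2 = max(0, min(y2, H))
--
--         for y in range(y1, y2):
--             for x in range(x1, x2):
--                 screen[y][x] = name  # 后面的窗口会覆盖前面
--
--     # 统计归属
--     area_count = defaultdict(int)
--     for row in screen:
--         for cell in row:
--             if cell:
--                 area_count[cell] += 1
--
--     return dict(area_count)
-- ===== SOURCE B (Python) =====
-- def compute_visible_area_by_pixel(screen_size, windows):
--     W, H = screen_size
--     # top-most first; among equal z the later-inserted window is on top
--     order = list(reversed(sorted(windows.items(), key=lambda x: x[1][2])))
--     counts = {}
--     for y in range(H):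
--         # windows whose y-span covers this row, top-most first
--         row = [(name, x1, x2) for name, ((x1, y1), (x2, y2), z) in order if y1 <= y < y2]
--         for x in range(W):
--             name = next((n for n, x1, x2 in row if x1 <= x < x2), None)
--             if name:
--                 counts[name] = counts.get(name, 0) + 1
--     return counts
-- ===== Notes on version B (the rewrite author's own statement) =====
-- stated objective: alternative
-- what changed: B drops A's W*H framebuffer entirely: instead of painting every window bottom-to-top into a mutable pixel grid and then scanning the grid, B walks the pixels once and asks, per row, which of the row's active windows (pre-filtered from the z-descending order) is topmost at each x, counting directly into the result dict.
import Mathlib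
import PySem

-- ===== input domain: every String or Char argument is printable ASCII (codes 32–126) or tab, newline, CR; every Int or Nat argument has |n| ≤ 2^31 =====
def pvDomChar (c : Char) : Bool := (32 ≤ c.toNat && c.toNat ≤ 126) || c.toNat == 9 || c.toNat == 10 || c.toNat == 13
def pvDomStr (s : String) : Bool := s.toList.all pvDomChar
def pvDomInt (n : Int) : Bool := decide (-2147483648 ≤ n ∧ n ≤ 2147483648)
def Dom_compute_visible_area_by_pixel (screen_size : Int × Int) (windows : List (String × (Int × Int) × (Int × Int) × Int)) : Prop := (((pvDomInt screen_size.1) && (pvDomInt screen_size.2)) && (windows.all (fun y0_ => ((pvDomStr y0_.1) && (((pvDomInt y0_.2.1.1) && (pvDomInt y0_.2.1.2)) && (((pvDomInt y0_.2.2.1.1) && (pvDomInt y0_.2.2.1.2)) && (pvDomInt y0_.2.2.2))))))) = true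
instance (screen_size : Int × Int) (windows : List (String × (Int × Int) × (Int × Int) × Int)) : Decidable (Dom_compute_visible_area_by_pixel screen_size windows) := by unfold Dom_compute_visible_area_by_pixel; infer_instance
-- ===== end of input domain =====

-- B replaces A's painter-style framebuffer (allocate W*H grid, paint windows bottom-to-top, then scan) by a direct per-pixel top-most-window query with no grid at all; alternative decomposition, not claimed faster.


-- ===== PORT A =====
def compute_visible_area_by_pixel (screen_size : Int × Int) (windows : List (String × (Int × Int) × (Int × Int) × Int)) : List (String × Int) :=
  let W := screen_size.1
  let H := screen_size.2
  -- screen = [[None]*W for _ in range(H)]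
  let screen : List (List (Option String)) :=
    (PySem.List.pyRange 0 H 1).map (fun _ => (PySem.List.pyRange 0 W 1).map (fun _ => (none : Option String)))
  -- sorted(windows.items(), key=lambda x: x[1][2])
  let sorted_windows := PySem.List.sorted windows (fun p => p.2.2.2)
  -- paint each window onto the screen (indices are always in range after clamping, so pySetD/pyGetD are exact)
  let screen := sorted_windows.foldl (fun scr p =>
    let name := p.1
    let x1 := max 0 (min p.2.1.1 W)
    let x2 := max 0 (min p.2.2.1.1 W)
    let y1 := max 0 (min p.2.1.2 H)
    let y2 := max 0 (min p.2.2.1.2 H)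
    (PySem.List.pyRange y1 y2 1).foldl (fun scr y =>
      (PySem.List.pyRange x1 x2 1).foldl (fun scr x =>
        PySem.List.pySetD scr y (PySem.List.pySetD (PySem.List.pyGetD scr y []) x (some name))) scr) scr) screen
  -- count ownership; `if cell:` skips None and the empty string; defaultdict increment = Dict.modify
  let area_count := screen.foldl (fun d row =>
    row.foldl (fun d cell =>
      match cell with
      | some s => if s ≠ "" then d.modify s 0 (· + 1) else d
      | none => d) d) (PySem.Dict.empty : PySem.Dict String Int)
  area_count.items

-- ===== PORT B =====
-- first row-active window covering x (inner 'next(...)' scan of B)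
def pvFindOwnerRow (row : List (String × Int × Int)) (x : Int) : Option String :=
  match row with
  | [] => none
  | (name, x1, x2) :: rest =>
    if x1 ≤ x ∧ x < x2 then some name else pvFindOwnerRow rest x

def compute_visible_area_by_pixel_alt (screen_size : Int × Int) (windows : List (String × (Int × Int) × (Int × Int) × Int)) : List (String × Int) :=
  let W := screen_size.1
  let H := screen_size.2
  -- list(reversed(sorted(windows.items(), key=lambda x: x[1][2])))
  let order := (PySem.List.sorted windows (fun p => p.2.2.2)).reverse
  let counts := (PySem.List.pyRange 0 H 1).foldl (fun d y =>
    -- row = [(name, x1, x2) for name, ((x1, y1), (x2, y2), z) in order if y1 <= y < y2]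
    let row := order.filterMap (fun p =>
      if p.2.1.2 ≤ y ∧ y < p.2.2.1.2 then some (p.1, p.2.1.1, p.2.2.1.1) else none)
    (PySem.List.pyRange 0 W 1).foldl (fun d x =>
      match pvFindOwnerRow row x with
      | some s => if s ≠ "" then d.insert s (d.getD s 0 + 1) else d
      | none => d) d) (PySem.Dict.empty : PySem.Dict String Int)
  counts.items

-- ===== PRECONDITION & SPEC =====
def Spec_compute_visible_area_by_pixel (screen_size : Int × Int) (windows : List (String × (Int × Int) × (Int × Int) × Int)) (out : List (String × Int)) : Prop := out = compute_visible_area_by_pixel_alt screen_size windows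
instance (screen_size : Int × Int) (windows : List (String × (Int × Int) × (Int × Int) × Int)) (out : List (String × Int)) : Decidable (Spec_compute_visible_area_by_pixel screen_size windows out) := by unfold Spec_compute_visible_area_by_pixel; infer_instance

-- ===== CLAIM (what is proved, stated in full; the proofs are below) =====
def Claim_equal_compute_visible_area_by_pixel : Prop := ∀ (screen_size : Int × Int) (windows : List (String × (Int × Int) × (Int × Int) × Int)), Dom_compute_visible_area_by_pixel screen_size windows → Spec_compute_visible_area_by_pixel screen_size windows (compute_visible_area_by_pixel screen_size windows)


-- ===== LEMMAS AND PROOFS =====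

-- top-most cover function (proof-only)
def pvFindOwner (order : List (String × (Int × Int) × (Int × Int) × Int)) (x y : Int) : Option String :=
  match order with
  | [] => none
  | (name, (x1, y1), (x2, y2), _z) :: rest =>
    if x1 ≤ x ∧ x < x2 ∧ y1 ≤ y ∧ y < y2 then some name else pvFindOwner rest x y

theorem pv_findOwnerRow_eq (order : List (String × (Int × Int) × (Int × Int) × Int)) (x y : Int) :
    pvFindOwnerRow (order.filterMap (fun p =>
        if p.2.1.2 ≤ y ∧ y < p.2.2.1.2 then some (p.1, p.2.1.1, p.2.2.1.1) else none)) x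
      = pvFindOwner order x y := by
  induction order with
  | nil => rfl
  | cons p rest ih =>
    obtain ⟨name, ⟨x1, y1⟩, ⟨x2, y2⟩, z⟩ := p
    simp only [List.filterMap_cons]
    by_cases hy : y1 ≤ y ∧ y < y2
    · obtain ⟨hy1, hy2⟩ := hy
      rw [if_pos ⟨hy1, hy2⟩]
      by_cases hx : x1 ≤ x ∧ x < x2
      · obtain ⟨hx1, hx2⟩ := hx
        simp [pvFindOwnerRow, pvFindOwner, hx1, hx2, hy1, hy2]
      · have hnc : ¬ (x1 ≤ x ∧ x < x2 ∧ y1 ≤ y ∧ y < y2) := by omega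
        simp [pvFindOwnerRow, pvFindOwner, hx, hnc, ih]
    · rw [if_neg hy]
      have hnc : ¬ (x1 ≤ x ∧ x < x2 ∧ y1 ≤ y ∧ y < y2) := by omega
      simp [pvFindOwner, hnc, ih]

-- tabulated H×W grid (proof-only helper)
def pvTab (W H : Int) (f : Int → Int → Option String) : List (List (Option String)) :=
  (PySem.List.pyRange 0 H 1).map (fun y => (PySem.List.pyRange 0 W 1).map (fun x => f x y))

theorem pv_setD_nil {α : Type} (x : Int) (v : α) : PySem.List.pySetD [] x v = [] := by
  simp [PySem.List.pySetD, PySem.List.pySet?, PySem.List.pyIdx?]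
  split_ifs <;> simp

theorem pv_getD_setD_self {α : Type} (g : List α) (y : Int) (r d : α) (hy : 0 ≤ y) :
    PySem.List.pyGetD (PySem.List.pySetD g y r) y d = if y.toNat < g.length then r else d := by
  rw [PySem.List.pySetD_of_nonneg g r hy, PySem.List.pyGetD_of_nonneg _ d hy]
  by_cases h : y.toNat < g.length
  · rw [if_pos h, List.getD_eq_getElem?_getD, List.getElem?_set_self]
    · rfl
    · exact h
  · rw [if_neg h, List.getD_eq_getElem?_getD,
      List.getElem?_eq_none (by simpa [List.length_set] using h)]
    rfl

theorem pv_getD_nil_of_oob {β : Type} (g : List (List β)) (y : Int) (hy : 0 ≤ y)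
    (h : ¬ y.toNat < g.length) : PySem.List.pyGetD g y ([] : List β) = [] := by
  rw [PySem.List.pyGetD_of_nonneg _ _ hy, List.getD_eq_getElem?_getD,
    List.getElem?_eq_none (by omega)]
  rfl

theorem pv_setD_setD_self {α : Type} (g : List α) (y : Int) (a b : α) (hy : 0 ≤ y) :
    PySem.List.pySetD (PySem.List.pySetD g y a) y b = PySem.List.pySetD g y b := by
  rw [PySem.List.pySetD_of_nonneg g a hy, PySem.List.pySetD_of_nonneg _ b hy,
    PySem.List.pySetD_of_nonneg g b hy, List.set_set]

theorem pv_setD_getD_self' {α : Type} (g : List α) (y : Int) (d : α) (hy : 0 ≤ y) :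
    PySem.List.pySetD g y (PySem.List.pyGetD g y d) = g := by
  by_cases h : y.toNat < g.length
  · rw [PySem.List.pySetD_of_nonneg g _ hy, PySem.List.pyGetD_of_nonneg _ d hy,
      List.getD_eq_getElem?_getD, List.getElem?_eq_getElem h]
    simp [List.set_getElem_self]
  · rw [PySem.List.pySetD_of_nonneg g _ hy, List.set_eq_of_length_le (by omega)]

-- collapse a row of grid-level writes 'scr[y][x] = v' into one write of the folded row
theorem pv_foldl_set2_collapse {α : Type} (v : α) (y : Int) (hy : 0 ≤ y) :
    ∀ (xs : List Int) (g : List (List α)),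
    xs.foldl (fun g x => PySem.List.pySetD g y (PySem.List.pySetD (PySem.List.pyGetD g y []) x v)) g
      = PySem.List.pySetD g y (xs.foldl (fun r x => PySem.List.pySetD r x v) (PySem.List.pyGetD g y [])) := by
  intro xs
  induction xs with
  | nil => intro g; exact (pv_setD_getD_self' g y [] hy).symm
  | cons x rest ih =>
    intro g
    simp only [List.foldl_cons]
    rw [ih, pv_setD_setD_self g y _ _ hy, pv_getD_setD_self g y _ [] hy]
    by_cases h : y.toNat < g.length
    · rw [if_pos h]
    · rw [if_neg h, pv_getD_nil_of_oob g y hy h, pv_setD_nil]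

-- writing one slot of a tabulated list
theorem pv_setD_map_pyRange {α : Type} (N j : Int) (f : Int → α) (w : α)
    (h0 : 0 ≤ j) (_hN : j < N) :
    PySem.List.pySetD ((PySem.List.pyRange 0 N 1).map f) j w
      = (PySem.List.pyRange 0 N 1).map (fun i => if i = j then w else f i) := by
  rw [PySem.List.pySetD_of_nonneg _ w h0]
  apply List.ext_getElem
  · simp
  · intro k h1 h2
    simp only [List.getElem_set, List.getElem_map]
    rw [PySem.List.getElem_pyRange_one]
    have hk : (k : Int) < N := by
      have := h2; simp [PySem.List.length_pyRange_one] at this; omega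
    by_cases he : j.toNat = k
    · rw [if_pos he, if_pos (by omega)]
    · rw [if_neg he, if_neg (by omega)]

-- a fold of slot rewrites over range(a,b) on a tabulated list is a pointwise if-update
theorem pv_foldl_setD_tab {α : Type} (N : Int) (d : α) (F : α → α) :
    ∀ (n : Nat) (a b : Int), 0 ≤ a → (a < b → b ≤ N) → (b - a).toNat = n → ∀ (f : Int → α),
    (PySem.List.pyRange a b 1).foldl
        (fun l i => PySem.List.pySetD l i (F (PySem.List.pyGetD l i d)))
        ((PySem.List.pyRange 0 N 1).map f)
      = (PySem.List.pyRange 0 N 1).map (fun i => if a ≤ i ∧ i < b then F (f i) else f i) := by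
  intro n
  induction n with
  | zero =>
    intro a b ha hb hn f
    rw [PySem.List.pyRange_one_eq_nil (a := a) (b := b) (by omega), List.foldl_nil]
    exact List.map_congr_left fun i _ => (if_neg (by omega)).symm
  | succ n ih =>
    intro a b ha hb hn f
    have hab : a < b := by omega
    have haN : a < N := by have := hb hab; omega
    rw [PySem.List.pyRange_one_cons hab, List.foldl_cons,
      PySem.List.pyGetD_map_pyRange_of_nonneg f N a d ha haN,
      pv_setD_map_pyRange N a f (F (f a)) ha haN,
      ih (a+1) b (by omega) (fun h => hb (by omega)) (by omega)]
    apply List.map_congr_left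
    intro i hi
    rw [PySem.List.mem_pyRange_one] at hi
    by_cases hia : i = a
    · subst hia; split_ifs <;> first | rfl | omega
    · split_ifs <;> first | rfl | omega


theorem pv_foldl_setD_tab_const {α : Type} (N : Int) (v : α) (a b : Int)
    (ha : 0 ≤ a) (hb : a < b → b ≤ N) (f : Int → α) :
    (PySem.List.pyRange a b 1).foldl (fun l i => PySem.List.pySetD l i v)
        ((PySem.List.pyRange 0 N 1).map f)
      = (PySem.List.pyRange 0 N 1).map (fun i => if a ≤ i ∧ i < b then v else f i) := by
  have h := pv_foldl_setD_tab N v (fun _ => v) (b - a).toNat a b ha hb rfl f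
  simpa using h

-- one painted window on a tabulated screen: pointwise if-update by the (unclamped) cover test
theorem pv_paint_tab (W H : Int) (name : String) (x1 y1 x2 y2 : Int) (f : Int → Int → Option String) :
    (PySem.List.pyRange (max 0 (min y1 H)) (max 0 (min y2 H)) 1).foldl (fun scr y =>
      (PySem.List.pyRange (max 0 (min x1 W)) (max 0 (min x2 W)) 1).foldl (fun scr x =>
        PySem.List.pySetD scr y (PySem.List.pySetD (PySem.List.pyGetD scr y []) x (some name))) scr)
      (pvTab W H f)
    = pvTab W H (fun x y => if x1 ≤ x ∧ x < x2 ∧ y1 ≤ y ∧ y < y2 then some name else f x y) := by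
  rw [PySem.List.foldl_congr_mem _ _
      (fun scr y => PySem.List.pySetD scr y
        ((PySem.List.pyRange (max 0 (min x1 W)) (max 0 (min x2 W)) 1).foldl
          (fun r x => PySem.List.pySetD r x (some name)) (PySem.List.pyGetD scr y [])))
      _
      (fun scr y hy => pv_foldl_set2_collapse (some name) y
        (by rw [PySem.List.mem_pyRange_one] at hy; omega) _ scr)]
  unfold pvTab
  have h := pv_foldl_setD_tab H ([] : List (Option String))
      (fun r => (PySem.List.pyRange (max 0 (min x1 W)) (max 0 (min x2 W)) 1).foldl
        (fun r x => PySem.List.pySetD r x (some name)) r)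
      ((max 0 (min y2 H)) - (max 0 (min y1 H))).toNat
      (max 0 (min y1 H)) (max 0 (min y2 H)) (by omega) (by omega) rfl
      (fun y => (PySem.List.pyRange 0 W 1).map (fun x => f x y))
  beta_reduce at h
  rw [h]; clear h
  apply List.map_congr_left
  intro y hy
  rw [PySem.List.mem_pyRange_one] at hy
  by_cases hya : max 0 (min y1 H) ≤ y ∧ y < max 0 (min y2 H)
  · rw [if_pos hya,
      pv_foldl_setD_tab_const W (some name) _ _ (by omega) (by omega)]
    apply List.map_congr_left
    intro x hx
    rw [PySem.List.mem_pyRange_one] at hx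
    beta_reduce
    by_cases hxa : max 0 (min x1 W) ≤ x ∧ x < max 0 (min x2 W)
    · rw [if_pos hxa, if_pos (by omega)]
    · rw [if_neg hxa, if_neg (by omega)]
  · rw [if_neg hya]
    apply List.map_congr_left
    intro x hx
    rw [PySem.List.mem_pyRange_one] at hx
    beta_reduce
    rw [if_neg (by omega)]

-- the whole painting loop tabulates the top-most-cover function
theorem pv_paint_all (W H : Int) (ws : List (String × (Int × Int) × (Int × Int) × Int)) :
    ws.foldl (fun scr p =>
      (PySem.List.pyRange (max 0 (min p.2.1.2 H)) (max 0 (min p.2.2.1.2 H)) 1).foldl (fun scr y =>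
        (PySem.List.pyRange (max 0 (min p.2.1.1 W)) (max 0 (min p.2.2.1.1 W)) 1).foldl (fun scr x =>
          PySem.List.pySetD scr y (PySem.List.pySetD (PySem.List.pyGetD scr y []) x (some p.1))) scr) scr)
      ((PySem.List.pyRange 0 H 1).map (fun _ => (PySem.List.pyRange 0 W 1).map (fun _ => (none : Option String))))
    = pvTab W H (fun x y => pvFindOwner ws.reverse x y) := by
  induction ws using List.reverseRecOn with
  | nil => rfl
  | append_singleton ts w ih =>
    rw [List.foldl_append, List.foldl_cons, List.foldl_nil, ih]
    obtain ⟨name, ⟨wx1, wy1⟩, ⟨wx2, wy2⟩, z⟩ := w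
    rw [pv_paint_tab W H name wx1 wy1 wx2 wy2]
    rw [List.reverse_append]
    rfl

-- ===== VERDICT (by name: the statement is the Claim_ definition above) =====
theorem compute_visible_area_by_pixel_spec : Claim_equal_compute_visible_area_by_pixel := by
  intro ss ws _
  unfold Spec_compute_visible_area_by_pixel
  simp only [compute_visible_area_by_pixel, compute_visible_area_by_pixel_alt]
  rw [pv_paint_all ss.1 ss.2 (PySem.List.sorted ws (fun p => p.2.2.2))]
  unfold pvTab
  rw [List.foldl_map]
  refine congrArg PySem.Dict.items ?_
  apply PySem.List.foldl_congr_mem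
  intro acc y _
  rw [List.foldl_map]
  apply PySem.List.foldl_congr_mem
  intro acc2 x _
  rw [pv_findOwnerRow_eq]
  rfl
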